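-- pv_equiv track=rewrite | github.com/bliscosque/leetcode | other_platforms/CompetitiveProgrammingEssentials/S6-Bit Manipulation problems/3-FindingSubsequences.py | findSS
-- ===== SOURCE A (Python) =====
-- def findSS(s):
--     n=len(s)
--     maxoverlay=2**n
--     ans=[]
--     def overlay(i):
--         s1=""
--         pos=0
--         while i:
--             last_bit=i%2
--             if last_bit:
--                 s1+=s[pos]
--             i=i>>1
--             pos+=1
--         ans.append(s1)
--
--     for i in range(maxoverlay):
--         overlay(i)
--
--     return ans
-- ===== SOURCE B (Python) =====
-- def findSS(s):
--     ans = [""]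
--     for c in s:
--         ans = ans + [x + c for x in ans]
--     return ans
-- ===== Notes on version B (the rewrite author's own statement) =====
-- stated objective: simpler
-- what changed: Replace the per-mask bit-decoding loop (overlay scanning bits of each of the 2^n indices) with iterative doubling: start from [""] and extend the whole list with each character once.
import Mathlib
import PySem

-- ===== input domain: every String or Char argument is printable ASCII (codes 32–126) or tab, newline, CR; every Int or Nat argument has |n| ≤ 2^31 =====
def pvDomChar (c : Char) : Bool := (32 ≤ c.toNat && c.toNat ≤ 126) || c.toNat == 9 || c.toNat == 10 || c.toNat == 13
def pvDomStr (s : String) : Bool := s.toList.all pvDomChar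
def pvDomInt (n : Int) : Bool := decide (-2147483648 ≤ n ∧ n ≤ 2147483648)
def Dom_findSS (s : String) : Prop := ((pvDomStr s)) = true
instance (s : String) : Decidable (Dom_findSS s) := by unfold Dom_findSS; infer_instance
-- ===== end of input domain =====

-- B replaces A's per-mask bit-decoding with iterative doubling of the subsequence list (objective: simpler).

-- ===== PORT A =====
-- A's inner `while i:` loop of overlay(i): decode the bits of i, appending s[pos] for each
-- set bit. `s[pos]` is ported as PySem.List.pyGet?; the `none` branch (Python's IndexError)
-- is unreachable here because the driver only calls it with i < 2^(len s).
def pvOverlayLoop (l : List Char) (i : Nat) (pos : Nat) (s1 : List Char) : List Char :=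
  if i = 0 then s1
  else
    pvOverlayLoop l (i / 2) (pos + 1)
      (if i % 2 = 1 then
         match PySem.List.pyGet? l (pos : Int) with
         | some c => s1 ++ [c]
         | none => s1            -- IndexError: unreachable for i < 2^(l.length)
       else s1)
decreasing_by exact Nat.div_lt_self (Nat.pos_of_ne_zero (by assumption)) (by omega)

def findSS (s : String) : List String :=
  let n := s.length
  let maxoverlay := 2 ^ n
  (List.range maxoverlay).foldl
    (fun ans i => ans ++ [String.mk (pvOverlayLoop s.toList i 0 [])]) []

-- ===== PORT B =====
-- Source B: ans = [""]; for c in s: ans = ans + [x + c for x in ans]; strings as char lists.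
def findSS_alt (s : String) : List String :=
  (s.toList.foldl (fun ans c => ans ++ ans.map (fun x => x ++ [c])) [[]]).map String.mk

-- ===== PRECONDITION & SPEC =====
def Spec_findSS (s : String) (out : List String) : Prop := out = findSS_alt s
instance (s : String) (out : List String) : Decidable (Spec_findSS s out) := by unfold Spec_findSS; infer_instance

-- ===== CLAIM (what is proved, stated in full; the proofs are below) =====
def Claim_equal_findSS : Prop := ∀ (s : String), Dom_findSS s → Spec_findSS s (findSS s)

-- ===== LEMMAS AND PROOFS =====

theorem pvOverlayLoop_zero (l : List Char) (pos : Nat) (s1 : List Char) :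
    pvOverlayLoop l 0 pos s1 = s1 := by
  rw [pvOverlayLoop]; simp

theorem pvOverlayLoop_acc (l : List Char) (i pos : Nat) (s1 : List Char) :
    pvOverlayLoop l i pos s1 = s1 ++ pvOverlayLoop l i pos [] := by
  induction i using Nat.strong_induction_on generalizing pos s1 with
  | _ i ih =>
    by_cases h : i = 0
    · simp [h, pvOverlayLoop_zero]
    · conv_lhs => rw [pvOverlayLoop]
      conv_rhs => rw [pvOverlayLoop]
      simp only [h, if_false]
      have hlt : i / 2 < i := Nat.div_lt_self (Nat.pos_of_ne_zero h) (by omega)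
      by_cases hb : i % 2 = 1
      · rw [if_pos hb, if_pos hb]
        cases hg : PySem.List.pyGet? l (pos : Int) with
        | none => exact ih _ hlt _ _
        | some c =>
          rw [ih _ hlt (pos+1) (s1 ++ [c]), ih _ hlt (pos+1) ([] ++ [c])]
          simp
      · rw [if_neg hb, if_neg hb]
        exact ih _ hlt _ _

-- one unrolling of A's while loop, with the accumulator pulled out
theorem pvOverlayLoop_step (l : List Char) (i pos : Nat) :
    pvOverlayLoop l i pos [] =
      (if i % 2 = 1 then (PySem.List.pyGet? l (pos : Int)).toList else []) ++
        pvOverlayLoop l (i / 2) (pos + 1) [] := by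
  by_cases h : i = 0
  · subst h; simp [pvOverlayLoop_zero]
  · rw [pvOverlayLoop]
    simp only [h, if_false]
    split_ifs with hb
    · cases hg : PySem.List.pyGet? l (pos : Int) with
      | none => simp
      | some c => rw [pvOverlayLoop_acc]; simp
    · simp

theorem pvGet_append_lt (l : List Char) (c : Char) (pos : Nat) (h : pos < l.length) :
    PySem.List.pyGet? (l ++ [c]) (pos : Int) = PySem.List.pyGet? l (pos : Int) := by
  simp [List.getElem?_append_left h]

-- small masks do not see the appended character
theorem pvOverlay_low (k : Nat) : ∀ (i pos : Nat) (l : List Char) (c : Char),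
    i < 2 ^ k → pos + k ≤ l.length →
    pvOverlayLoop (l ++ [c]) i pos [] = pvOverlayLoop l i pos [] := by
  induction k with
  | zero =>
    intro i pos l c hi _
    interval_cases i
    rw [pvOverlayLoop_zero, pvOverlayLoop_zero]
  | succ k ih =>
    intro i pos l c hi hpos
    rw [pvOverlayLoop_step (l ++ [c]), pvOverlayLoop_step l,
        ih (i / 2) (pos + 1) l c (by omega) (by omega)]
    by_cases hb : i % 2 = 1
    · rw [if_pos hb, if_pos hb, pvGet_append_lt l c pos (by omega)]
    · rw [if_neg hb, if_neg hb]

-- the high bit 2^k selects exactly the appended character, at the end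
theorem pvOverlay_high (k : Nat) : ∀ (i pos : Nat) (l : List Char) (c : Char),
    i < 2 ^ k → pos + k = l.length →
    pvOverlayLoop (l ++ [c]) (i + 2 ^ k) pos [] = pvOverlayLoop l i pos [] ++ [c] := by
  induction k with
  | zero =>
    intro i pos l c hi hpos
    interval_cases i
    have hc : PySem.List.pyGet? (l ++ [c]) (pos : Int) = some c := by
      subst hpos
      simp
    rw [pvOverlayLoop_step, pvOverlayLoop_zero]
    simp [hc, pvOverlayLoop_zero]
  | succ k ih =>
    intro i pos l c hi hpos
    have hmod : (i + 2 ^ (k+1)) % 2 = i % 2 := by rw [pow_succ]; omega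
    have hdiv : (i + 2 ^ (k+1)) / 2 = i / 2 + 2 ^ k := by rw [pow_succ]; omega
    rw [pvOverlayLoop_step (l ++ [c]), pvOverlayLoop_step l, hmod, hdiv,
        ih (i / 2) (pos + 1) l c (by omega) (by omega)]
    by_cases hb : i % 2 = 1
    · rw [if_pos hb, if_pos hb, pvGet_append_lt l c pos (by omega)]
      simp
    · rw [if_neg hb, if_neg hb]
      simp

theorem pvFoldl_append_map {α β : Type} (g : α → β) (xs : List α) (acc : List β) :
    xs.foldl (fun ans i => ans ++ [g i]) acc = acc ++ xs.map g := by
  induction xs generalizing acc with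
  | nil => simp
  | cons x xs ih => simp [List.foldl, ih]

-- core equivalence on char lists, by induction on the string from the right
theorem pvCore (l : List Char) :
    (List.range (2 ^ l.length)).map (fun i => pvOverlayLoop l i 0 []) =
      l.foldl (fun ans c => ans ++ ans.map (fun x => x ++ [c])) [[]] := by
  induction l using List.reverseRecOn with
  | nil => simp [pvOverlayLoop_zero]
  | append_singleton l c ih =>
    rw [List.foldl_append]
    simp only [List.foldl]
    rw [← ih]
    have hlen : (l ++ [c]).length = l.length + 1 := by simp
    rw [hlen, pow_succ, mul_two, List.range_add, List.map_append, List.map_map]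
    congr 1
    · exact List.map_congr_left fun i hi =>
        pvOverlay_low l.length i 0 l c (List.mem_range.mp hi) (by omega)
    · rw [List.map_map]
      apply List.map_congr_left
      intro i hi
      simp only [Function.comp]
      rw [Nat.add_comm (2 ^ l.length) i]
      exact pvOverlay_high l.length i 0 l c (List.mem_range.mp hi) (by omega)

-- ===== VERDICT (by name: the statement is the Claim_ definition above) =====
theorem findSS_spec : Claim_equal_findSS := by
  intro s _
  unfold Spec_findSS findSS findSS_alt
  rw [pvFoldl_append_map, List.nil_append,
      show s.length = s.toList.length from String.length_toList.symm,
      ← pvCore, List.map_map]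
  rfl
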